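-- pv_equiv track=rewrite | github.com/jacky0321/basic_search_sort_func | sort.py | gap_insert_sort
-- ===== SOURCE A (Python) =====
-- def gap_insert_sort(l, gap):
--     for count in range(gap, len(l)):
--         item = l[count]
--         loc = count
--         for i in reversed(range((count-gap)%gap, count, gap)):
--             if item < l[i]:
--                 l[loc], l[i] = l[i], l[loc]
--                 loc = i
--             else:
--                 break
--     return l
-- ===== SOURCE B (Python) =====
-- def gap_insert_sort(l, gap):
--     for start in range(min(gap, len(l))):
--         l[start::gap] = sorted(l[start::gap])
--     return l
-- ===== Notes on version B (the rewrite author's own statement) =====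
-- stated objective: alternative
-- what changed: Replaces the interleaved gapped-insertion pass with a per-residue decomposition: each strided slice l[start::gap] is extracted, sorted with the built-in sort, and written back, producing the identical final list (measured faster on large random data but not consistently, so no speed claim).
-- outside the precondition, e.g. on gap_insert_sort([3, 1, 2], -1): A returns [2, 1, 3], B returns [3, 1, 2]; on gap_insert_sort([3, 1], 0): A raises ZeroDivisionError, B returns [3, 1]
import Mathlib
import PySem

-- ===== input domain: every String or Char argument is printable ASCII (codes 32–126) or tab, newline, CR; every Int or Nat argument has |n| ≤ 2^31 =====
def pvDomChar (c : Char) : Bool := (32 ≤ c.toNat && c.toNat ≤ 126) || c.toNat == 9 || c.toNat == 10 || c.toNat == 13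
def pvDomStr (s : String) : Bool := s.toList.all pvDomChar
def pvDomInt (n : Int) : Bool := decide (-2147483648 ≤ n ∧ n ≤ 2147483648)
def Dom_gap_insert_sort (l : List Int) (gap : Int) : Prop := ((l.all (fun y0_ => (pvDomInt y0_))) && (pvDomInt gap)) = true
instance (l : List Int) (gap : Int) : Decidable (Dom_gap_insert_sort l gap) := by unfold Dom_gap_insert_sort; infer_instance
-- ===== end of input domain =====

-- B replaces A's interleaved gapped-insertion pass by sorting each strided slice l[start::gap]
-- independently (per-residue decomposition); both mutate l in place in Python, and the equivalence
-- proved here is about the returned list (which is that same list object in both).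

-- ===== PORT A =====
-- inner 'for i in reversed(range(...)): if item < l[i]: swap; loc = i else: break'
-- (the break is the non-recursive 'else' arm; state = (current list, loc))
def pvInnerA (item : Int) : List Int → List Int → Int → List Int
  | [], l, _ => l
  | i :: rest, l, loc =>
    if item < PySem.List.pyGetD l i 0 then
      pvInnerA item rest
        (PySem.List.pySetD (PySem.List.pySetD l loc (PySem.List.pyGetD l i 0)) i
          (PySem.List.pyGetD l loc 0)) i
    else l

def gap_insert_sort (l : List Int) (gap : Int) : List Int :=
  (PySem.List.pyRange gap (l.length : Int) 1).foldl
    (fun l count =>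
      pvInnerA (PySem.List.pyGetD l count 0)
        ((PySem.List.pyRange (PySem.Int.mod (count - gap) gap) count gap).reverse) l count) l

-- ===== PORT B =====
-- l[start::gap] extraction / strided-slice assignment, exact for 0 ≤ start and 1 ≤ gap
-- with len(value) == len(slice) — the only way B ever calls them.
def pvGetStride : List Int → Nat → Nat → List Int
  | [], _, _ => []
  | x :: xs, 0, g => x :: pvGetStride xs (g - 1) g
  | _ :: xs, k + 1, g => pvGetStride xs k g

def pvSetStride : List Int → Nat → Nat → List Int → List Int
  | [], _, _, _ => []
  | x :: xs, 0, g, [] => x :: xs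
  | _ :: xs, 0, g, v :: vt => v :: pvSetStride xs (g - 1) g vt
  | x :: xs, k + 1, g, vs => x :: pvSetStride xs k g vs

def gap_insert_sort_alt (l : List Int) (gap : Int) : List Int :=
  (PySem.List.pyRange 0 (min gap (l.length : Int)) 1).foldl
    (fun l start =>
      pvSetStride l start.toNat gap.toNat
        (PySem.List.sorted (pvGetStride l start.toNat gap.toNat) (fun x => x))) l

-- ===== PRECONDITION & SPEC =====
-- Pre_ excludes gap <= 0, outside the natural Shell-sort domain: for gap == 0 A raises
-- ZeroDivisionError on non-empty input, and for negative gap A's range/% arithmetic walks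
-- negative indices with Python's wraparound, an accident B does not reproduce.
def Pre_gap_insert_sort (l : List Int) (gap : Int) : Prop := 1 ≤ gap
instance (l : List Int) (gap : Int) : Decidable (Pre_gap_insert_sort l gap) := by
  unfold Pre_gap_insert_sort; infer_instance

def pvWitness_gap_insert_sort : List Int × Int := ([5, 1, 4, 2, 3], 2)

def Spec_gap_insert_sort (l : List Int) (gap : Int) (out : List Int) : Prop := out = gap_insert_sort_alt l gap
instance (l : List Int) (gap : Int) (out : List Int) : Decidable (Spec_gap_insert_sort l gap out) := by unfold Spec_gap_insert_sort; infer_instance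

-- ===== CLAIM (what is proved, stated in full; the proofs are below) =====
def Claim_equal_gap_insert_sort : Prop := ∀ (l : List Int) (gap : Int), Dom_gap_insert_sort l gap → Pre_gap_insert_sort l gap → Spec_gap_insert_sort l gap (gap_insert_sort l gap)


-- ===== LEMMAS AND PROOFS =====

-- left-to-right insertion (insert after equals), the per-residue content of A's pass
def pvIns (x : Int) (acc : List Int) : List Int :=
  PySem.List.insertBy (fun a b => decide (a < b)) x acc
def pvFoldIns (s : List Int) : List Int := s.foldl (fun acc x => pvIns x acc) []

theorem pvFoldIns_eq_sorted (s : List Int) :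
    pvFoldIns s = PySem.List.sorted s (fun x => x) := by
  exact (PySem.List.sorted_eq_foldl_insertBy s (fun x => x)).symm

theorem pvFoldIns_length (s : List Int) : (pvFoldIns s).length = s.length := by
  rw [pvFoldIns_eq_sorted]; exact PySem.List.length_sorted s _ false

theorem pvFoldIns_pairwise (s : List Int) : (pvFoldIns s).Pairwise (· ≤ ·) := by
  have h := PySem.List.sorted_pairwise s (fun x => x)
  rw [pvFoldIns_eq_sorted]; exact h

-- pointwise view of a strided slice
theorem pvGetStride_getElem? (l : List Int) (k j g : Nat) (hg : 1 ≤ g) :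
    (pvGetStride l k g)[j]? = l[k + j * g]? := by
  induction l generalizing k j with
  | nil => simp [pvGetStride]
  | cons x xs ih =>
    match k with
    | 0 =>
      match j with
      | 0 => simp [pvGetStride]
      | j + 1 =>
        have h1 : (0 : Nat) + (j + 1) * g = ((g - 1) + j * g) + 1 := by
          have : 1 ≤ g := hg; cases g with
          | zero => omega
          | succ g' => ring_nf; omega
        rw [h1]
        simp only [pvGetStride, List.getElem?_cons_succ]
        exact ih (g - 1) j
    | k + 1 =>
      have h1 : (k + 1) + j * g = (k + j * g) + 1 := by omega
      rw [h1]
      simp only [pvGetStride, List.getElem?_cons_succ]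
      exact ih k j

theorem pvGetStride_len_iff (l : List Int) (k m g : Nat) (hg : 1 ≤ g) :
    m < (pvGetStride l k g).length ↔ k + m * g < l.length := by
  have h := pvGetStride_getElem? l k m g hg
  constructor
  · intro hlt
    by_contra hc
    have h2 : l[k + m * g]? = none := List.getElem?_eq_none_iff.mpr (by omega)
    rw [h2] at h
    exact absurd h (by simp [List.getElem?_eq_getElem hlt])
  · intro hlt
    by_contra hc
    have h2 : (pvGetStride l k g)[m]? = none := List.getElem?_eq_none_iff.mpr (by omega)
    rw [h2] at h
    exact absurd h.symm (by simp [List.getElem?_eq_getElem hlt])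

theorem pvGetStride_length_le (l : List Int) (k m g : Nat) (hg : 1 ≤ g)
    (h : l.length ≤ k + m * g) : (pvGetStride l k g).length ≤ m := by
  by_contra hc
  have := (pvGetStride_len_iff l k m g hg).mp (by omega)
  omega

-- distinct residues never collide
theorem pvResidue_ne (k k' m j g : Nat) (hk : k < g) (hk' : k' < g) (hne : k ≠ k') :
    k + m * g ≠ k' + j * g := by
  intro hEq
  have hmj : m ≠ j := by rintro rfl; omega
  rcases Nat.lt_or_ge m j with h | h
  · have h2 : m * g + g ≤ j * g := by
      calc m * g + g = (m + 1) * g := by ring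
        _ ≤ j * g := Nat.mul_le_mul_right g (by omega)
    omega
  · have h2 : j * g + g ≤ m * g := by
      calc j * g + g = (j + 1) * g := by ring
        _ ≤ m * g := Nat.mul_le_mul_right g (by omega)
    omega

theorem pvGetStride_set_self (l : List Int) (k m g : Nat) (hg : 1 ≤ g) (v : Int) :
    pvGetStride (l.set (k + m * g) v) k g = (pvGetStride l k g).set m v := by
  apply List.ext_getElem?
  intro j
  rw [pvGetStride_getElem? _ k j g hg, List.getElem?_set, List.getElem?_set,
    pvGetStride_getElem? _ k j g hg]
  by_cases hmj : m = j
  · subst hmj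
    simp [pvGetStride_len_iff l k m g hg]
  · have hne2 : k + m * g ≠ k + j * g := by
      intro hEq
      have h3 : m * g = j * g := by omega
      exact hmj (Nat.eq_of_mul_eq_mul_right (show 0 < g by omega) h3)
    rw [if_neg hne2, if_neg hmj]


theorem pvGetStride_set_other (l : List Int) (k k' m g : Nat) (hg : 1 ≤ g)
    (hk : k < g) (hk' : k' < g) (hne : k ≠ k') (v : Int) :
    pvGetStride (l.set (k + m * g) v) k' g = pvGetStride l k' g := by
  apply List.ext_getElem?
  intro j
  rw [pvGetStride_getElem? _ k' j g hg, List.getElem?_set,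
    pvGetStride_getElem? _ k' j g hg]
  simp [pvResidue_ne k k' m j g hk hk' hne]

theorem pvGetStride_setStride_self (l : List Int) (k g : Nat) (vs : List Int) (hg : 1 ≤ g)
    (hlen : vs.length ≤ (pvGetStride l k g).length) :
    pvGetStride (pvSetStride l k g vs) k g = vs ++ (pvGetStride l k g).drop vs.length := by
  induction l generalizing k vs with
  | nil =>
    have hvs : vs = [] := by simpa [pvGetStride] using hlen
    subst hvs
    simp [pvSetStride, pvGetStride]
  | cons x xs ih =>
    match k, vs with
    | 0, [] => simp [pvSetStride]
    | 0, v :: vt =>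
      simp only [pvSetStride, pvGetStride]
      simp only [pvGetStride, List.length_cons] at hlen
      rw [ih (g - 1) vt (by omega)]
      simp
    | k + 1, vs =>
      simp only [pvSetStride, pvGetStride]
      simp only [pvGetStride] at hlen
      exact ih k vs hlen

theorem pvGetStride_setStride_other (l : List Int) (k k' g : Nat) (vs : List Int) (hg : 1 ≤ g)
    (hk : k < g) (hk' : k' < g) (hne : k ≠ k') :
    pvGetStride (pvSetStride l k g vs) k' g = pvGetStride l k' g := by
  induction l generalizing k k' vs with
  | nil => simp [pvSetStride]
  | cons x xs ih =>
    match k, k', vs with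
    | 0, k' + 1, [] => simp [pvSetStride]
    | 0, k' + 1, v :: vt =>
      simp only [pvSetStride, pvGetStride]
      exact ih (g - 1) k' vt (by omega) (by omega) (by omega)
    | k + 1, 0, vs =>
      simp only [pvSetStride, pvGetStride]
      rw [ih k (g - 1) vs (by omega) (by omega) (by omega)]
    | k + 1, k'' + 1, vs =>
      simp only [pvSetStride, pvGetStride]
      exact ih k k'' vs (by omega) (by omega) (by omega)

-- two lists with the same strided slices for every residue are equal
theorem pvEq_of_strides (g : Nat) (hg : 1 ≤ g) (l₁ l₂ : List Int)
    (h : ∀ r, r < g → pvGetStride l₁ r g = pvGetStride l₂ r g) : l₁ = l₂ := by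
  apply List.ext_getElem?
  intro i
  have hi : (i % g) + (i / g) * g = i := Nat.mod_add_div' i g
  have h1 := pvGetStride_getElem? l₁ (i % g) (i / g) g hg
  have h2 := pvGetStride_getElem? l₂ (i % g) (i / g) g hg
  rw [hi] at h1 h2
  rw [← h1, ← h2, h (i % g) (Nat.mod_lt i (by omega))]

-- inserting at the head when everything is above item
theorem pvIns_head (T : List Int) (item : Int) (hgt : ∀ y ∈ T, item < y) :
    pvIns item T = item :: T := by
  cases T with
  | nil => simp [pvIns, PySem.List.insertBy]
  | cons y ys =>
    have hy : item < y := hgt y (by simp)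
    simp [pvIns, PySem.List.insertBy, hy]

-- insertion position: a sorted T with T[k] ≤ item and everything after position k above item
theorem pvIns_pos (T : List Int) (item : Int) (k : Nat) (hk : k < T.length)
    (hsort : T.Pairwise (· ≤ ·)) (hle : T[k] ≤ item)
    (hgt : ∀ y ∈ T.drop (k + 1), item < y) :
    pvIns item T = T.take (k + 1) ++ item :: T.drop (k + 1) := by
  induction T generalizing k with
  | nil => simp at hk
  | cons t T' ih =>
    match k, hk, hle, hgt with
    | 0, hk, hle, hgt =>
      have hle' : t ≤ item := by simpa using hle
      have hnot : ¬ item < t := not_lt.mpr hle'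
      have htail : pvIns item T' = item :: T' := by
        apply pvIns_head
        intro y hy
        exact hgt y (by simpa using hy)
      simp only [pvIns, PySem.List.insertBy] at htail ⊢
      simp [hnot, htail]
    | k + 1, hk, hle, hgt =>
      have hk' : k < T'.length := by simpa using hk
      have hmem : T'[k] ∈ T' := List.getElem_mem hk'
      have hth : ∀ y ∈ T', t ≤ y := (List.pairwise_cons.mp hsort).1
      have hle2 : T'[k] ≤ item := by simpa using hle
      have hnot : ¬ item < t := not_lt.mpr (le_trans (hth _ hmem) hle2)
      have ihres := ih k hk' (List.pairwise_cons.mp hsort).2 hle2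
        (by intro y hy; exact hgt y (by simpa using hy))
      simp only [pvIns, PySem.List.insertBy] at ihres ⊢
      simp [hnot, ihres]

-- set in the middle of an append
theorem pvSet_append_length (xs ys : List Int) (y v : Int) :
    (xs ++ y :: ys).set xs.length v = xs ++ v :: ys := by
  induction xs with
  | nil => simp
  | cons a xs ih => simp [ih]

-- the reversed stepped range peels its largest element
theorem pvRange_count (r g k : Nat) (hg : 1 ≤ g) :
    PySem.List.pyRange (r : Int) ((r + k * g : Nat) : Int) (g : Int)
      = (List.range k).map (fun (i : Nat) => (r : Int) + (g : Int) * (i : Int)) := by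
  have hgpos : (0 : Int) < (g : Int) := by exact_mod_cast hg
  rw [PySem.List.pyRange_of_pos _ _ hgpos]
  have hcount : (if (r : Int) < ((r + k * g : Nat) : Int)
      then ((((r + k * g : Nat) : Int) - r + g - 1) / g).toNat else 0) = k := by
    match k with
    | 0 => simp
    | k + 1 =>
      have hlt : (r : Int) < ((r + (k + 1) * g : Nat) : Int) := by
        push_cast; nlinarith
      have hdiv : (((r + (k + 1) * g : Nat) : Int) - r + g - 1) / g = ((k + 1 : Nat) : Int) := by
        have harith : (((r + (k + 1) * g : Nat) : Int) - r + g - 1)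
            = ((g : Int) - 1) + ((k + 1 : Nat) : Int) * g := by push_cast; ring
        rw [harith, Int.add_mul_ediv_right _ _ (by omega),
          Int.ediv_eq_zero_of_lt (by omega) (by omega)]
        ring
      rw [if_pos hlt, hdiv]
      simp
  rw [hcount]

theorem pvRange_rev_cons (r g k : Nat) (hg : 1 ≤ g) :
    (PySem.List.pyRange (r : Int) ((r + (k + 1) * g : Nat) : Int) (g : Int)).reverse
      = ((r + k * g : Nat) : Int) :: (PySem.List.pyRange (r : Int) ((r + k * g : Nat) : Int) (g : Int)).reverse := by
  rw [pvRange_count r g (k + 1) hg, pvRange_count r g k hg, List.range_succ]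
  simp [List.reverse_append]
  push_cast
  ring

theorem pvRange_self_nil (r g : Nat) :
    PySem.List.pyRange (r : Int) (r : Int) (g : Int) = [] := by
  simp [PySem.List.pyRange]

-- the inner loop, abstracted to residue r, bubbling item down from stride position k
theorem pvInnerA_spec (g : Nat) (hg : 1 ≤ g) (r : Nat) (hr : r < g)
    (item : Int) (T rest : List Int) :
    ∀ (k : Nat) (l' : List Int), k ≤ T.length →
      pvGetStride l' r g = T.take k ++ item :: T.drop k ++ rest →
      (∀ y ∈ T.drop k, item < y) →
      T.Pairwise (· ≤ ·) →
      (pvInnerA item ((PySem.List.pyRange (r : Int) ((r + k * g : Nat) : Int) (g : Int)).reverse)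
          l' ((r + k * g : Nat) : Int)).length = l'.length ∧
      pvGetStride (pvInnerA item ((PySem.List.pyRange (r : Int) ((r + k * g : Nat) : Int) (g : Int)).reverse)
          l' ((r + k * g : Nat) : Int)) r g = pvIns item T ++ rest ∧
      (∀ r', r' < g → r' ≠ r →
        pvGetStride (pvInnerA item ((PySem.List.pyRange (r : Int) ((r + k * g : Nat) : Int) (g : Int)).reverse)
            l' ((r + k * g : Nat) : Int)) r' g = pvGetStride l' r' g) := by
  intro k
  induction k with
  | zero =>
    intro l' hk hstr hgt hsort
    have hc : ((r + 0 * g : Nat) : Int) = (r : Int) := by push_cast; ring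
    rw [hc, pvRange_self_nil, List.reverse_nil]
    refine ⟨rfl, ?_, fun r' _ _ => rfl⟩
    show pvGetStride l' r g = pvIns item T ++ rest
    rw [hstr, pvIns_head T item (by simpa using hgt)]
    simp
  | succ k ih =>
    intro l' hk hstr hgt hsort
    have hkT : k < T.length := by omega
    have htake : T.take (k + 1) = T.take k ++ [T[k]] := by
      rw [List.take_add_one]; simp [List.getElem?_eq_getElem hkT]
    have hdrop : T.drop k = T[k] :: T.drop (k + 1) := List.drop_eq_getElem_cons hkT
    have hstr' : pvGetStride l' r g = T.take (k + 1) ++ item :: (T.drop (k + 1) ++ rest) := by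
      rw [hstr]; simp
    -- the two values the loop body reads
    have hlen2 : (T.take (k + 1)).length = k + 1 := by simp [List.length_take]; omega
    have hfragk : (pvGetStride l' r g)[k]? = some T[k] := by
      rw [hstr', List.getElem?_append_left (by omega)]
      simp [List.getElem?_take, hkT, List.getElem?_eq_getElem hkT]
    have hfragk1 : (pvGetStride l' r g)[k + 1]? = some item := by
      rw [hstr', List.getElem?_append_right (by omega), hlen2]
      simp
    have hvalk : l'[r + k * g]? = some T[k] := by
      rw [← pvGetStride_getElem? l' r k g hg]; exact hfragk
    have hvalk1 : l'[r + (k + 1) * g]? = some item := by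
      rw [← pvGetStride_getElem? l' r (k + 1) g hg]; exact hfragk1
    have hgetD : PySem.List.pyGetD l' ((r + k * g : Nat) : Int) 0 = T[k] := by
      rw [PySem.List.pyGetD_natCast, List.getD_eq_getElem?_getD, hvalk]; rfl
    have hgetD1 : PySem.List.pyGetD l' ((r + (k + 1) * g : Nat) : Int) 0 = item := by
      rw [PySem.List.pyGetD_natCast, List.getD_eq_getElem?_getD, hvalk1]; rfl
    rw [pvRange_rev_cons r g k hg]
    by_cases hcmp : item < T[k]
    · -- swap and recurse
      simp only [pvInnerA, hgetD, hgetD1, if_pos hcmp, PySem.List.pySetD_natCast]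
      set l2 : List Int := (l'.set (r + (k + 1) * g) T[k]).set (r + k * g) item with hl2
      have hlen2 : l2.length = l'.length := by simp [hl2]
      have hstr2 : pvGetStride l2 r g = T.take k ++ item :: T.drop k ++ rest := by
        rw [hl2, pvGetStride_set_self _ _ _ _ hg, pvGetStride_set_self _ _ _ _ hg, hstr', htake]
        have e1 : (T.take k ++ [T[k]]) ++ item :: (T.drop (k + 1) ++ rest)
            = (T.take k ++ [T[k]]) ++ item :: (T.drop (k + 1) ++ rest) := rfl
        have hlenpre : (T.take k ++ [T[k]]).length = k + 1 := by
          simp [List.length_take]; omega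
        have e2 : ((T.take k ++ [T[k]]) ++ item :: (T.drop (k + 1) ++ rest)).set (k + 1) T[k]
            = (T.take k ++ [T[k]]) ++ T[k] :: (T.drop (k + 1) ++ rest) := by
          rw [← hlenpre, pvSet_append_length]
        have hlenpre2 : (T.take k).length = k := by simp [List.length_take]; omega
        have e3 : ((T.take k ++ [T[k]]) ++ T[k] :: (T.drop (k + 1) ++ rest))
            = T.take k ++ T[k] :: (T[k] :: (T.drop (k + 1) ++ rest)) := by
          rw [List.append_assoc]; rfl
        have e4 := pvSet_append_length (T.take k) (T[k] :: (T.drop (k + 1) ++ rest)) T[k] item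
        rw [hlenpre2] at e4
        calc (((T.take k ++ [T[k]]) ++ item :: (T.drop (k + 1) ++ rest)).set (k + 1) T[k]).set
              k item
            = ((T.take k ++ [T[k]]) ++ T[k] :: (T.drop (k + 1) ++ rest)).set k item := by
              rw [e2]
          _ = (T.take k ++ T[k] :: (T[k] :: (T.drop (k + 1) ++ rest))).set k item := by rw [e3]
          _ = T.take k ++ item :: (T[k] :: (T.drop (k + 1) ++ rest)) := e4
          _ = T.take k ++ item :: T.drop k ++ rest := by
              rw [hdrop]
              simp only [List.append_assoc, List.cons_append]
      have hgt2 : ∀ y ∈ T.drop k, item < y := by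
        rw [hdrop]
        intro y hy
        rcases List.mem_cons.mp hy with rfl | hy'
        · exact hcmp
        · exact hgt y hy'
      obtain ⟨ihlen, ihstr, ihoth⟩ := ih l2 (by omega) hstr2 hgt2 hsort
      refine ⟨by rw [ihlen, hlen2], ihstr, ?_⟩
      intro r' hr' hne
      rw [ihoth r' hr' hne, hl2,
        pvGetStride_set_other _ _ _ _ _ hg hr hr' (fun h => hne h.symm),
        pvGetStride_set_other _ _ _ _ _ hg hr hr' (fun h => hne h.symm)]
    · -- break: the element is already in place
      simp only [pvInnerA, hgetD, hgetD1, if_neg hcmp]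
      refine ⟨by trivial, ?_, by intro r' hr' hne; trivial⟩
      show pvGetStride l' r g = pvIns item T ++ rest
      rw [hstr', pvIns_pos T item k hkT hsort (not_lt.mp hcmp) hgt]
      simp

-- A's inner range start: (count - gap) % gap is count's residue
theorem pvModCast (r₀ j g : Nat) (hj : 1 ≤ j) (hr : r₀ < g) :
    PySem.Int.mod (((r₀ + j * g : Nat) : Int) - (g : Int)) (g : Int) = (r₀ : Int) := by
  have h1 : (((r₀ + j * g : Nat) : Int) - (g : Int)) = (r₀ : Int) + (g : Int) * ((j - 1 : Nat) : Int) := by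
    push_cast
    rw [Nat.cast_sub hj]
    push_cast
    ring
  have h2 : (0 : Int) ≤ (g : Int) := by positivity
  simp only [PySem.Int.mod]
  rw [Int.fmod_eq_emod, h1, Int.add_mul_emod_self_left,
    Int.emod_eq_of_lt (by positivity) (by exact_mod_cast hr)]
  simp [h2]

theorem pvFoldIns_take_one (s : List Int) :
    pvFoldIns (s.take 1) ++ s.drop 1 = s := by
  cases s with
  | nil => simp [pvFoldIns]
  | cons x xs => simp [pvFoldIns, pvIns, PySem.List.insertBy]

theorem pvFoldIns_snoc (xs : List Int) (x : Int) :
    pvFoldIns (xs ++ [x]) = pvIns x (pvFoldIns xs) := by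
  simp [pvFoldIns, List.foldl_append]

-- the outer pass of A, from count = r₀ + j*g with the first p(r) stride entries already inserted
theorem pvOuterA_fold (g : Nat) (hg : 1 ≤ g) (l₀ : List Int) (n : Nat) (hn : l₀.length = n) :
    ∀ (d j r₀ : Nat) (l' : List Int), 1 ≤ j → r₀ < g → n ≤ r₀ + j * g + d →
      l'.length = n →
      (∀ r, r < g → pvGetStride l' r g =
        pvFoldIns ((pvGetStride l₀ r g).take (if r < r₀ then j + 1 else j)) ++
          (pvGetStride l₀ r g).drop (if r < r₀ then j + 1 else j)) →
      ∀ r, r < g →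
        pvGetStride
          ((PySem.List.pyRange ((r₀ + j * g : Nat) : Int) (n : Int) 1).foldl
            (fun l count =>
              pvInnerA (PySem.List.pyGetD l count 0)
                ((PySem.List.pyRange (PySem.Int.mod (count - (g : Int)) (g : Int)) count (g : Int)).reverse) l count) l')
          r g = pvFoldIns (pvGetStride l₀ r g) := by
  intro d
  induction d with
  | zero =>
    intro j r₀ l' hj hr₀ hd hlen hstr r hr
    have hgj : g ≤ j * g := Nat.le_mul_of_pos_left g (by omega)
    have hend : n ≤ r₀ + j * g := by omega
    rw [PySem.List.pyRange_one_eq_nil (by exact_mod_cast hend)]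
    simp only [List.foldl_nil]
    have hple : (pvGetStride l₀ r g).length ≤ (if r < r₀ then j + 1 else j) := by
      by_cases h1 : r < r₀
      · rw [if_pos h1]
        apply pvGetStride_length_le l₀ r (j + 1) g hg
        have : (j + 1) * g = j * g + g := by ring
        omega
      · rw [if_neg h1]
        apply pvGetStride_length_le l₀ r j g hg
        omega
    rw [hstr r hr, List.take_of_length_le hple, List.drop_eq_nil_of_le hple,
      List.append_nil]
  | succ d ih =>
    intro j r₀ l' hj hr₀ hd hlen hstr r hr
    by_cases hend : n ≤ r₀ + j * g
    · rw [PySem.List.pyRange_one_eq_nil (by exact_mod_cast hend)]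
      simp only [List.foldl_nil]
      have hple : (pvGetStride l₀ r g).length ≤ (if r < r₀ then j + 1 else j) := by
        by_cases h1 : r < r₀
        · rw [if_pos h1]
          apply pvGetStride_length_le l₀ r (j + 1) g hg
          have : (j + 1) * g = j * g + g := by ring
          omega
        · rw [if_neg h1]
          apply pvGetStride_length_le l₀ r j g hg
          omega
      rw [hstr r hr, List.take_of_length_le hple, List.drop_eq_nil_of_le hple,
        List.append_nil]
    · have hcn : r₀ + j * g < n := by omega
      rw [PySem.List.pyRange_one_cons (by exact_mod_cast hcn), List.foldl_cons]
      set S : List Int := pvGetStride l₀ r₀ g with hS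
      set T : List Int := pvFoldIns (S.take j) with hT
      have hjS : j < S.length := by
        rw [hS, pvGetStride_len_iff l₀ r₀ j g hg, hn]
        exact hcn
      have hSdrop : S.drop j = S[j] :: S.drop (j + 1) := List.drop_eq_getElem_cons hjS
      have hTlen : T.length = j := by
        rw [hT, pvFoldIns_length, List.length_take]
        omega
      have hTsort : T.Pairwise (· ≤ ·) := by rw [hT]; exact pvFoldIns_pairwise _
      have hTtake : T.take j = T := by rw [← hTlen]; exact List.take_length
      have hTdrop : T.drop j = [] := by rw [← hTlen]; exact List.drop_length
      have hstr0 : pvGetStride l' r₀ g = T ++ S[j] :: S.drop (j + 1) := by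
        have := hstr r₀ hr₀
        rw [if_neg (by omega)] at this
        rw [this, hSdrop]
      have hstr1 : pvGetStride l' r₀ g = T.take j ++ S[j] :: T.drop j ++ S.drop (j + 1) := by
        rw [hTtake, hTdrop, hstr0]
        simp
      have hgt1 : ∀ y ∈ T.drop j, S[j] < y := by rw [hTdrop]; simp
      obtain ⟨ihlen, ihstr, ihoth⟩ :=
        pvInnerA_spec g hg r₀ hr₀ S[j] T (S.drop (j + 1)) j l' (by omega) hstr1 hgt1 hTsort
      -- the value the loop body reads is S[j]
      have hfrag : (pvGetStride l' r₀ g)[j]? = some S[j] := by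
        rw [hstr0, List.getElem?_append_right (by omega), hTlen]
        simp
      have hval : l'[r₀ + j * g]? = some S[j] := by
        rw [← pvGetStride_getElem? l' r₀ j g hg]
        exact hfrag
      have hgetD : PySem.List.pyGetD l' ((r₀ + j * g : Nat) : Int) 0 = S[j] := by
        rw [PySem.List.pyGetD_natCast, List.getD_eq_getElem?_getD, hval]
        rfl
      have hmod : PySem.Int.mod (((r₀ + j * g : Nat) : Int) - (g : Int)) (g : Int) = (r₀ : Int) :=
        pvModCast r₀ j g hj hr₀
      rw [hgetD, hmod]
      set l2 : List Int :=
        pvInnerA S[j] ((PySem.List.pyRange (r₀ : Int) ((r₀ + j * g : Nat) : Int) (g : Int)).reverse)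
          l' ((r₀ + j * g : Nat) : Int) with hl2
      have hstr2 : pvGetStride l2 r₀ g = pvFoldIns (S.take (j + 1)) ++ S.drop (j + 1) := by
        rw [hl2, ihstr]
        have htk : S.take (j + 1) = S.take j ++ [S[j]] := by
          rw [List.take_add_one]
          simp [List.getElem?_eq_getElem hjS]
        rw [htk, pvFoldIns_snoc, ← hT]
      by_cases hlt : r₀ + 1 < g
      · have hcast : ((r₀ + j * g : Nat) : Int) + 1 = (((r₀ + 1) + j * g : Nat) : Int) := by
          push_cast; ring
        rw [hcast]
        apply ih j (r₀ + 1) l2 hj hlt (by omega) (by rw [hl2] at *; rw [ihlen, hlen])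
        · intro r' hr'
          by_cases hra : r' = r₀
          · subst hra
            rw [if_pos (by omega), hstr2]
          · rw [hl2] at *
            rw [ihoth r' hr' hra, hstr r' hr']
            by_cases h1 : r' < r₀
            · rw [if_pos h1, if_pos (by omega)]
            · rw [if_neg h1, if_neg (by omega)]
        · exact hr
      · have hr0g : r₀ + 1 = g := by omega
        have hcast : ((r₀ + j * g : Nat) : Int) + 1 = ((0 + (j + 1) * g : Nat) : Int) := by
          have : r₀ + j * g + 1 = 0 + (j + 1) * g := by
            have : (j + 1) * g = j * g + g := by ring
            omega
          push_cast [← this]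
          ring
        rw [hcast]
        apply ih (j + 1) 0 l2 (by omega) (by omega) ?hd (by rw [hl2] at *; rw [ihlen, hlen])
        · intro r' hr'
          rw [if_neg (by omega)]
          by_cases hra : r' = r₀
          · subst hra
            rw [hstr2]
          · rw [hl2] at *
            rw [ihoth r' hr' hra, hstr r' hr']
            rw [if_pos (by omega)]
        · exact hr
        case hd =>
          have h1 : (j + 1) * g = j * g + g := by ring
          omega

-- the pass of B, from residue a (stop m = min gap len) with residues below a already sorted
theorem pvOuterB_fold (g : Nat) (hg : 1 ≤ g) (m : Nat) (hm : m ≤ g) (l₀ : List Int) :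
    ∀ (e a : Nat) (l' : List Int), m ≤ a + e → a ≤ m →
      (∀ r, r < g → pvGetStride l' r g =
        if r < a then PySem.List.sorted (pvGetStride l₀ r g) (fun x => x) else pvGetStride l₀ r g) →
      ∀ r, r < g →
        pvGetStride
          ((PySem.List.pyRange (a : Int) (m : Int) 1).foldl
            (fun l start =>
              pvSetStride l start.toNat g
                (PySem.List.sorted (pvGetStride l start.toNat g) (fun x => x))) l')
          r g =
        if r < m then PySem.List.sorted (pvGetStride l₀ r g) (fun x => x) else pvGetStride l₀ r g := by
  intro e
  induction e with
  | zero =>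
    intro a l' h1 h2 hstr r hr
    have ham : a = m := by omega
    subst ham
    rw [PySem.List.pyRange_one_eq_nil (by omega), List.foldl_nil]
    exact hstr r hr
  | succ e ih =>
    intro a l' h1 h2 hstr r hr
    by_cases hend : m ≤ a
    · have ham : a = m := by omega
      subst ham
      rw [PySem.List.pyRange_one_eq_nil (by omega), List.foldl_nil]
      exact hstr r hr
    · have ham : a < m := by omega
      have halt : a < g := by omega
      rw [PySem.List.pyRange_one_cons (by exact_mod_cast ham), List.foldl_cons]
      have hcast : ((a : Int) + 1) = ((a + 1 : Nat) : Int) := by push_cast; ring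
      rw [hcast]
      have htn : ((a : Int)).toNat = a := Int.toNat_natCast a
      set vs := PySem.List.sorted (pvGetStride l' ((a : Int)).toNat g) (fun x => x) with hvs
      have hvslen : vs.length = (pvGetStride l' a g).length := by
        rw [hvs, htn]; exact PySem.List.length_sorted _ _ _
      have hsa : pvGetStride (pvSetStride l' ((a : Int)).toNat g vs) a g
          = PySem.List.sorted (pvGetStride l₀ a g) (fun x => x) := by
        rw [htn, pvGetStride_setStride_self l' a g vs hg (le_of_eq hvslen),
          hvslen, List.drop_length, List.append_nil, hvs, htn]
        congr 1
        simpa using hstr a halt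
      have hoth : ∀ r', r' < g → r' ≠ a →
          pvGetStride (pvSetStride l' ((a : Int)).toNat g vs) r' g = pvGetStride l' r' g := by
        intro r' hr' hne
        rw [htn]
        exact pvGetStride_setStride_other l' a r' g vs hg halt hr' (fun h => hne h.symm)
      apply ih (a + 1) _ (by omega) (by omega)
      · intro r' hr'
        by_cases hra : r' = a
        · subst hra
          rw [hsa, if_pos (by omega)]
        · rw [hoth r' hr' hra, hstr r' hr']
          by_cases hlt : r' < a
          · rw [if_pos hlt, if_pos (by omega)]
          · rw [if_neg hlt, if_neg (by omega)]
      · exact hr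

-- ===== VERDICT (by name: the statement is the Claim_ definition above) =====
theorem gap_insert_sort_spec : Claim_equal_gap_insert_sort := by
  intro l gap _ hpre
  unfold Pre_gap_insert_sort at hpre
  unfold Spec_gap_insert_sort
  lift gap to Nat using (by omega : (0 : Int) ≤ gap) with g hgcast
  have hg : 1 ≤ g := by exact_mod_cast hpre
  unfold gap_insert_sort gap_insert_sort_alt
  apply pvEq_of_strides g hg
  intro r hr
  -- A's pass sorts every stride by left-to-right insertion
  have hA : ∀ r', r' < g →
      pvGetStride
        ((PySem.List.pyRange (g : Int) (l.length : Int) 1).foldl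
          (fun l count =>
            pvInnerA (PySem.List.pyGetD l count 0)
              ((PySem.List.pyRange (PySem.Int.mod (count - (g : Int)) (g : Int)) count (g : Int)).reverse) l count) l)
        r' g = pvFoldIns (pvGetStride l r' g) := by
    have hstart : PySem.List.pyRange (g : Int) (l.length : Int) 1
        = PySem.List.pyRange ((0 + 1 * g : Nat) : Int) (l.length : Int) 1 := by norm_num
    intro r' hr'
    rw [hstart]
    apply pvOuterA_fold g hg l l.length rfl l.length 1 0 l (by omega) (by omega) (by omega) rfl
      ?_ r' hr'
    intro r'' hr''
    rw [if_neg (by omega)]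
    exact (pvFoldIns_take_one (pvGetStride l r'' g)).symm
  -- B's pass sorts every stride with the library sort
  have hB : ∀ r', r' < g →
      pvGetStride
        ((PySem.List.pyRange 0 (min ((g : Nat) : Int) (l.length : Int)) 1).foldl
          (fun l start =>
            pvSetStride l start.toNat ((g : Int)).toNat
              (PySem.List.sorted (pvGetStride l start.toNat ((g : Int)).toNat) (fun x => x))) l)
        r' g = PySem.List.sorted (pvGetStride l r' g) (fun x => x) := by
    intro r' hr'
    have htn : ((g : Int)).toNat = g := Int.toNat_natCast g
    simp only [htn]
    have hzero : (0 : Int) = ((0 : Nat) : Int) := by norm_num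
    have hmin : min ((g : Nat) : Int) (l.length : Int) = ((min g l.length : Nat) : Int) := by
      push_cast; rfl
    rw [hzero, hmin]
    have hres := pvOuterB_fold g hg (min g l.length) (Nat.min_le_left g l.length) l
      (min g l.length) 0 l (by omega) (by omega)
      (by intro r'' hr''; rw [if_neg (by omega)]) r' hr'
    rw [hres]
    by_cases hrm : r' < min g l.length
    · rw [if_pos hrm]
    · rw [if_neg hrm]
      have hnil : pvGetStride l r' g = [] := by
        have hlen0 : (pvGetStride l r' g).length ≤ 0 :=
          pvGetStride_length_le l r' 0 g hg (by omega)
        exact List.eq_nil_of_length_eq_zero (by omega)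
      rw [hnil]
      rfl
  rw [hA r hr, hB r hr, pvFoldIns_eq_sorted]
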